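-- pv_equiv track=rewrite | github.com/catuscio/gh-stars-classifier-skill | scripts/fetch_stars.py | stratified_sample
-- ===== SOURCE A (Python) =====
-- from collections import Counter, defaultdict
--
-- def stratified_sample(items: list[dict], n: int) -> list[dict]:
--     """Round-robin across languages so the sample covers the user's breadth."""
--     if len(items) <= n:
--         return items
--     buckets: dict[str, list[dict]] = defaultdict(list)
--     for r in items:
--         buckets[r["language"] or "None"].append(r)
--     result: list[dict] = []
--     while len(result) < n and buckets:
--         for lang in list(buckets.keys()):
--             if len(result) >= n:
--                 break
--             result.append(buckets[lang].pop(0))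
--             if not buckets[lang]:
--                 del buckets[lang]
--     return result
-- ===== SOURCE B (Python) =====
-- def stratified_sample(items: list[dict], n: int) -> list[dict]:
--     """Round-robin stratified sample, via one tagging pass + one stable sort.
--
--     Tag each item with (index within its language bucket, first-appearance rank
--     of that bucket); round-robin order is exactly ascending order of that pair.
--     """
--     if len(items) <= n:
--         return items
--     within: dict[str, int] = {}
--     rank: dict[str, int] = {}
--     keyed = []
--     for r in items:
--         lang = r["language"] or "None"
--         if lang not in rank:
--             rank[lang] = len(rank)
--         i = within.get(lang, 0)
--         within[lang] = i + 1
--         keyed.append(((i, rank[lang]), r))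
--     keyed.sort(key=lambda p: p[0])
--     return [r for _, r in keyed[:max(0, n)]]
-- ===== Notes on version B (the rewrite author's own statement) =====
-- stated objective: alternative
-- what changed: Replaces the destructive while/round-robin loop over a dict of buckets (pop(0)/del/break) by one tagging pass that attaches (index-within-language-bucket, bucket-first-appearance-rank) to each item followed by a single stable sort on that pair and a slice.
import Mathlib
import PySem

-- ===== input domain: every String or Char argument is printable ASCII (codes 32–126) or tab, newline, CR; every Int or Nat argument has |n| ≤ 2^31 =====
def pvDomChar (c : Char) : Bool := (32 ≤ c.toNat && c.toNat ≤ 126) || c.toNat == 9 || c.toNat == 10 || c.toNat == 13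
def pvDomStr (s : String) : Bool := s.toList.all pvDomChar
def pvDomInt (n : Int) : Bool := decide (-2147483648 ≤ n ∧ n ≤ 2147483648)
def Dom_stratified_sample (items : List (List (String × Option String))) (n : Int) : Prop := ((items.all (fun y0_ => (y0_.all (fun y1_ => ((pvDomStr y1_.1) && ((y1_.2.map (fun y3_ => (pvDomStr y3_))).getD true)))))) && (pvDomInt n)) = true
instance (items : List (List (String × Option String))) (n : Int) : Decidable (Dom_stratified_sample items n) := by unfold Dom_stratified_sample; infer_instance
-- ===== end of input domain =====

-- B replaces A's destructive round-robin while-loop over a bucket dict by one tagging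
-- pass ((within-bucket index, bucket first-appearance rank) per item) followed by a
-- single stable sort on that pair and a slice (objective: alternative algorithm).
-- Pre_ excludes exactly the inputs where Python A raises KeyError (an item without a
-- "language" key, reached only when len(items) > n); B raises there too.


-- ===== PORT A =====
-- r["language"] or "None": first-match lookup in the item's association list; a missing
-- "language" key is a Python KeyError (excluded by Pre_; the value here is irrelevant).
def pvLang (r : List (String × Option String)) : String :=
  match (PySem.Dict.mk r).get? "language" with
  | some (some s) => if s = "" then "None" else s   -- '' is falsy: `or` yields "None"
  | some none => "None"
  | none => "None"                                   -- KeyError in Python (outside Pre_)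

-- buckets = defaultdict(list); for r in items: buckets[r["language"] or "None"].append(r)
def pvBuckets (items : List (List (String × Option String))) :
    PySem.Dict String (List (List (String × Option String))) :=
  items.foldl (fun d r => d.modify (pvLang r) [] (· ++ [r])) PySem.Dict.empty

-- for lang in list(buckets.keys()): if len(result) >= n: break;
-- result.append(buckets[lang].pop(0)); if not buckets[lang]: del buckets[lang]
def pvPass (ks : List String) (b : PySem.Dict String (List (List (String × Option String))))
    (res : List (List (String × Option String))) (n : Int) :
    PySem.Dict String (List (List (String × Option String))) × List (List (String × Option String)) :=
  match ks with
  | [] => (b, res)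
  | k :: ks' =>
    if n ≤ (res.length : Int) then (b, res)
    else
      match b.get? k with
      | some (r :: rest) =>
          pvPass ks' (if rest = [] then b.erase k else b.insert k rest) (res ++ [r]) n
      | _ => (b, res)   -- unreachable: every key of buckets maps to a nonempty list

-- while len(result) < n and buckets: <one pass over list(buckets.keys())>
-- (fuel only makes the recursion total: each executed pass pops at least one item,
-- so items.length + 1 rounds always suffice)
def pvLoop (fuel : Nat) (b : PySem.Dict String (List (List (String × Option String))))
    (res : List (List (String × Option String))) (n : Int) :
    List (List (String × Option String)) :=
  match fuel with
  | 0 => res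
  | fuel' + 1 =>
    if (res.length : Int) < n ∧ b.items ≠ [] then
      let p := pvPass b.keys b res n
      pvLoop fuel' p.1 p.2 n
    else res

def stratified_sample (items : List (List (String × Option String))) (n : Int) :
    List (List (String × Option String)) :=
  if (items.length : Int) ≤ n then items
  else pvLoop (items.length + 1) (pvBuckets items) [] n

-- ===== PORT B =====
-- one pass: within[lang] counts the bucket, rank[lang] records first-appearance order,
-- keyed collects ((within-index, rank), r)
def pvTagFold (items : List (List (String × Option String))) :
    PySem.Dict String Int × PySem.Dict String Int ×
      List ((Int × Int) × List (String × Option String)) :=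
  items.foldl
    (fun st r =>
      let lang := pvLang r
      let rank' := if st.2.1.contains lang then st.2.1
                   else st.2.1.insert lang (st.2.1.size : Int)
      let i := st.1.getD lang 0
      (st.1.insert lang (i + 1), rank',
        st.2.2 ++ [((i, rank'.getD lang 0), r)]))
    (PySem.Dict.empty, PySem.Dict.empty, [])

def stratified_sample_alt (items : List (List (String × Option String))) (n : Int) :
    List (List (String × Option String)) :=
  if (items.length : Int) ≤ n then items
  else
    let keyed := (pvTagFold items).2.2
    let srt := PySem.List.sorted2 keyed (fun p => p.1.1) (fun p => p.1.2)  -- keyed.sort(key=lambda p: p[0])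
    (PySem.List.slice srt none (some (max 0 n))).map (fun p => p.2)        -- [r for _, r in keyed[:max(0, n)]]

-- ===== PRECONDITION & SPEC =====
-- Pre_ excludes exactly the inputs on which Python A raises KeyError: some item without
-- a "language" key while len(items) > n (B raises the same KeyError there).
def Pre_stratified_sample (items : List (List (String × Option String))) (n : Int) : Prop :=
  (items.length : Int) ≤ n ∨ ∀ r ∈ items, ((PySem.Dict.mk r).get? "language").isSome = true
instance (items : List (List (String × Option String))) (n : Int) : Decidable (Pre_stratified_sample items n) := by unfold Pre_stratified_sample; infer_instance

def pvWitness_stratified_sample : (List (List (String × Option String))) × Int :=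
  ([[("language", some "py")], [("language", none)], [("language", some "py")]], 2)

def Spec_stratified_sample (items : List (List (String × Option String))) (n : Int) (out : List (List (String × Option String))) : Prop := out = stratified_sample_alt items n
instance (items : List (List (String × Option String))) (n : Int) (out : List (List (String × Option String))) : Decidable (Spec_stratified_sample items n out) := by unfold Spec_stratified_sample; infer_instance

-- ===== CLAIM (what is proved, stated in full; the proofs are below) =====
def Claim_equal_stratified_sample : Prop := ∀ (items : List (List (String × Option String))) (n : Int), Dom_stratified_sample items n → Pre_stratified_sample items n → Spec_stratified_sample items n (stratified_sample items n)

-- ===== LEMMAS AND PROOFS =====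
-- ===== model: round-robin over grouped buckets =====
def pvTl {α : Type} (gs : List (String × List α)) : Nat := (gs.map (fun p => p.2.length)).sum

def pvHeads {α : Type} (gs : List (String × List α)) : List α := gs.filterMap (fun p => p.2.head?)

def pvStep {α : Type} (gs : List (String × List α)) : List (String × List α) :=
  (gs.map (fun p => (p.1, p.2.tail))).filter (fun p => !p.2.isEmpty)

theorem pvTl_step_le {α : Type} (gs : List (String × List α)) : pvTl (pvStep gs) ≤ pvTl gs := by
  induction gs with
  | nil => simp [pvTl, pvStep]
  | cons p gs ih =>
    simp only [pvTl, pvStep, List.map_cons, List.filter_cons] at *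
    cases h : p.2 with
    | nil => simpa using le_trans ih (by omega)
    | cons x xs =>
      by_cases hx : xs = [] <;> simp [h, hx, List.isEmpty_iff] at * <;> omega

theorem pvTl_step_lt {α : Type} (gs : List (String × List α)) (h : pvTl gs ≠ 0) :
    pvTl (pvStep gs) < pvTl gs := by
  induction gs with
  | nil => simp [pvTl] at h
  | cons p gs ih =>
    simp only [pvTl, pvStep, List.map_cons, List.filter_cons] at *
    cases hp : p.2 with
    | nil =>
      simp only [hp, List.length_nil] at h ⊢
      have := ih (by simpa using h)
      simpa [pvStep, pvTl] using this
    | cons x xs =>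
      have hle : pvTl (pvStep gs) ≤ pvTl gs := pvTl_step_le gs
      by_cases hx : xs = [] <;>
        simp [hp, hx, List.isEmpty_iff, pvStep, pvTl] at * <;> omega

def pvRR {α : Type} (gs : List (String × List α)) : List α :=
  if h : pvTl gs = 0 then [] else pvHeads gs ++ pvRR (pvStep gs)
termination_by pvTl gs
decreasing_by exact pvTl_step_lt gs h
def pvLangs (items : List (List (String × Option String))) : List String :=
  PySem.Set.ofList (items.map pvLang)
def pvBucket (items : List (List (String × Option String))) (k : String) :
    List (List (String × Option String)) := items.filter (fun r => pvLang r == k)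
def pvG (items : List (List (String × Option String))) :
    List (String × List (List (String × Option String))) :=
  (pvLangs items).map (fun k => (k, pvBucket items k))

theorem pvBuckets_keys (items : List (List (String × Option String))) :
    (pvBuckets items).keys = pvLangs items := by
  unfold pvBuckets pvLangs
  rw [PySem.Dict.keys_foldl_modify_key (key := pvLang) (f := fun _ r => (· ++ [r]))]
  simp [PySem.Set.update, PySem.Set.ofList_eq_foldl, PySem.Dict.keys_empty]

theorem pvBuckets_keys_nodup (items : List (List (String × Option String))) :
    (pvBuckets items).keys.Nodup := by
  unfold pvBuckets
  exact PySem.Dict.nodup_keys_foldl_modify_key _ pvLang _ _ _ (by simp [PySem.Dict.keys_empty])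

theorem pvBuckets_getD (items : List (List (String × Option String))) (k : String) :
    (pvBuckets items).getD k [] = pvBucket items k := by
  unfold pvBuckets pvBucket
  rw [show (items.foldl (fun d r => d.modify (pvLang r) [] (· ++ [r])) PySem.Dict.empty)
      = ((items.map (fun r => (pvLang r, r))).foldl (fun d p => d.modify p.1 [] (· ++ [p.2])) PySem.Dict.empty)
    from (List.foldl_map (f := fun r => (pvLang r, r)) (g := fun d p => d.modify p.1 [] (· ++ [p.2])) (init := PySem.Dict.empty) (l := items)).symm]
  rw [PySem.Dict.getD_foldl_modify_append]
  simp [PySem.Dict.getD_empty, List.filter_map, Function.comp_def, List.map_map]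
theorem pvBuckets_items (items : List (List (String × Option String))) :
    (pvBuckets items).items = pvG items := by
  rw [PySem.Dict.items_eq_map_keys _ (pvBuckets_keys_nodup items) []]
  rw [pvBuckets_keys]
  unfold pvG
  exact List.map_congr_left (fun k _ => by rw [pvBuckets_getD])

theorem pvHeads_length {α : Type} (gs : List (String × List α)) (h : ∀ p ∈ gs, p.2 ≠ []) :
    (pvHeads gs).length = gs.length := by
  induction gs with
  | nil => rfl
  | cons p gs ih =>
    have hp := h p (by simp)
    cases hv : p.2 with
    | nil => exact absurd hv hp
    | cons x xs =>
      simp only [pvHeads, List.filterMap_cons, hv]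
      simpa [pvHeads] using ih (fun q hq => h q (by simp [hq]))

theorem pvHeads_cons_of_ne {α : Type} (k : String) (r : α) (rest : List α)
    (gs : List (String × List α)) :
    pvHeads ((k, r :: rest) :: gs) = r :: pvHeads gs := by
  simp [pvHeads]

theorem pvTl_ne_zero {α : Type} (gs : List (String × List α)) (hne : gs ≠ [])
    (h : ∀ p ∈ gs, p.2 ≠ []) : pvTl gs ≠ 0 := by
  cases gs with
  | nil => exact absurd rfl hne
  | cons p gs =>
    have hp := h p (by simp)
    cases hv : p.2 with
    | nil => exact absurd hv hp
    | cons x xs => simp [pvTl, hv]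

theorem pvStep_ne_nil {α : Type} (gs : List (String × List α)) :
    ∀ p ∈ pvStep gs, p.2 ≠ [] := by
  intro p hp
  simp only [pvStep, List.mem_filter, Bool.not_eq_true'] at hp
  simpa [List.isEmpty_iff] using hp.2

theorem pvRR_nil {α : Type} : pvRR ([] : List (String × List α)) = [] := by
  rw [pvRR]; simp [pvTl]

theorem pvRR_unfold {α : Type} (gs : List (String × List α)) (h : pvTl gs ≠ 0) :
    pvRR gs = pvHeads gs ++ pvRR (pvStep gs) := by
  rw [pvRR]; simp [h]

theorem pvLoop_of_ge (fuel : Nat) (b : PySem.Dict String (List (List (String × Option String))))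
    (res : List (List (String × Option String))) (n : Int) (h : n ≤ (res.length : Int)) :
    pvLoop fuel b res n = res := by
  cases fuel with
  | zero => rfl
  | succ f => rw [pvLoop]; simp; intro h'; omega
theorem pvPass_spec (n : Int) :
    ∀ (seg done : List (String × List (List (String × Option String))))
      (b : PySem.Dict String (List (List (String × Option String))))
      (res : List (List (String × Option String))),
      b.items = done ++ seg → b.keys.Nodup → (∀ p ∈ seg, p.2 ≠ []) →
      (pvPass (seg.map (fun p => p.1)) b res n).2
          = res ++ (pvHeads seg).take ((n - (res.length : Int)).toNat)
        ∧ (((seg.length : Int) ≤ n - (res.length : Int)) →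
            (pvPass (seg.map (fun p => p.1)) b res n).1.items = done ++ pvStep seg
            ∧ (pvPass (seg.map (fun p => p.1)) b res n).1.keys.Nodup) := by
  intro seg
  induction seg with
  | nil =>
    intro done b res hb hnd hnn
    refine ⟨by simp [pvPass, pvHeads], fun _ => ⟨by simpa [pvPass, pvStep] using hb, hnd⟩⟩
  | cons p seg' ih =>
    intro done b res hb hnd hnn
    obtain ⟨k, v⟩ := p
    obtain ⟨r, rest, rfl⟩ : ∃ r rest, v = r :: rest := by
      cases hv : v with
      | nil => exact absurd hv (hnn (k, v) (by simp))
      | cons x xs => exact ⟨x, xs, rfl⟩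
    by_cases hbreak : n ≤ (res.length : Int)
    · constructor
      · have : (n - (res.length : Int)).toNat = 0 := by omega
        simp [pvPass, hbreak, this]
      · intro hle
        exfalso
        have : ((seg'.length : Int) + 1) ≤ n - res.length := by
          simpa [List.length_cons, Int.natCast_succ] using hle
        omega
    · -- the key is present with value r :: rest
      have hkdone : k ∉ done.map (fun p => p.1) := by
        have h := hnd
        simp only [PySem.Dict.keys, hb, List.map_append, List.map_cons] at h
        intro hmem
        exact (List.disjoint_of_nodup_append h) hmem (by simp)
      have hkseg : k ∉ seg'.map (fun p => p.1) := by
        have h := hnd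
        simp only [PySem.Dict.keys, hb, List.map_append, List.map_cons] at h
        have h2 := (List.nodup_append.mp h).2.1
        simpa using (List.nodup_cons.mp h2).1
      have hget : b.get? k = some (r :: rest) := by
        refine PySem.Dict.get?_of_mem_items b ?_ hnd
        rw [hb]; simp
      -- the updated dict
      set b' := (if rest = [] then b.erase k else b.insert k rest) with hb'def
      have hbitems' : b'.items = (done ++ (if rest = [] then [] else [(k, rest)])) ++ seg' := by
        by_cases hr : rest = []
        · simp only [hb'def, if_pos hr]
          show b.items.filter (fun p => !(p.1 == k)) = _
          rw [hb]
          rw [List.filter_append, List.filter_cons]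
          rw [List.filter_eq_self.mpr (fun p hp => by
            simp only [Bool.not_eq_eq_eq_not, Bool.not_true, beq_eq_false_iff_ne]
            intro hpk; exact hkdone (by simpa [hpk] using List.mem_map_of_mem (f := fun p => p.1) hp))]
          rw [List.filter_eq_self.mpr (fun p hp => by
            simp only [Bool.not_eq_eq_eq_not, Bool.not_true, beq_eq_false_iff_ne]
            intro hpk; exact hkseg (by simpa [hpk] using List.mem_map_of_mem (f := fun p => p.1) hp))]
          simp [hr]
        · have hcont : b.contains k = true := by
            rw [PySem.Dict.contains_eq_isSome_get?, hget]; rfl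
          simp only [hb'def, if_neg hr]
          rw [PySem.Dict.items_insert_of_contains b rest hcont, hb]
          rw [List.map_append, List.map_cons]
          simp only [BEq.rfl, if_pos rfl]
          rw [List.map_congr_left (fun p hp => by
            rw [if_neg]; simp only [beq_iff_eq]
            intro hpk; exact hkdone (by simpa [hpk] using List.mem_map_of_mem (f := fun p => p.1) hp))]
          rw [List.map_congr_left (l := seg') (fun p hp => by
            rw [if_neg]; simp only [beq_iff_eq]
            intro hpk; exact hkseg (by simpa [hpk] using List.mem_map_of_mem (f := fun p => p.1) hp))]
          simp [hr]
      have hnd' : b'.keys.Nodup := by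
        have hold : (done.map (fun p => p.1) ++ ((k, r :: rest) :: seg').map (fun p => p.1)).Nodup := by
          have h := hnd; rwa [PySem.Dict.keys, hb, List.map_append] at h
        have hkeys : b'.keys = (done ++ (if rest = [] then [] else [(k, rest)])).map (fun p => p.1) ++ seg'.map (fun p => p.1) := by
          simp only [PySem.Dict.keys, hbitems', List.map_append]
        rw [hkeys]
        by_cases hr : rest = []
        · simp only [hr, ite_true, List.append_nil]
          refine hold.sublist ?_
          simp only [List.map_cons]
          exact List.Sublist.append_left (List.sublist_cons_self _ _) _
        · simp only [hr, ite_false, List.map_append, List.map_cons, List.map_nil]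
          simpa using hold
      have hih := ih (done ++ (if rest = [] then [] else [(k, rest)])) b' (res ++ [r])
        hbitems' hnd' (fun q hq => hnn q (by simp [hq]))
      -- unfold one step of pvPass
      have hstep : pvPass (((k, r :: rest) :: seg').map (fun p => p.1)) b res n
          = pvPass (seg'.map (fun p => p.1)) b' (res ++ [r]) n := by
        simp only [List.map_cons, pvPass, if_neg hbreak, hget]
        rw [← hb'def]
      rw [hstep]
      have hstepg : pvStep ((k, r :: rest) :: seg') = (if rest = [] then [] else [(k, rest)]) ++ pvStep seg' := by
        by_cases hr : rest = [] <;> simp [pvStep, hr]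
      constructor
      · rw [hih.1]
        rw [pvHeads_cons_of_ne]
        obtain ⟨m', hm'⟩ : ∃ m', (n - (res.length : Int)).toNat = m' + 1 := ⟨(n - res.length).toNat - 1, by omega⟩
        rw [hm', List.take_succ_cons]
        have : (n - ((res ++ [r]).length : Int)).toNat = m' := by simp; omega
        rw [this]
        simp
      · intro hle
        have hle' : (seg'.length : Int) ≤ n - ((res ++ [r]).length : Int) := by
          simp only [List.length_cons] at hle; push_cast at hle ⊢; simp at hle ⊢; omega
        obtain ⟨h1, h2⟩ := hih.2 hle'
        refine ⟨?_, h2⟩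
        rw [h1, hstepg]
        simp [List.append_assoc]
theorem pvLoop_spec (n : Int) :
    ∀ (fuel : Nat) (b : PySem.Dict String (List (List (String × Option String))))
      (res : List (List (String × Option String))),
      pvTl b.items ≤ fuel → b.keys.Nodup → (∀ p ∈ b.items, p.2 ≠ []) →
      pvLoop fuel b res n = res ++ (pvRR b.items).take ((n - (res.length : Int)).toNat) := by
  intro fuel
  induction fuel with
  | zero =>
    intro b res hfuel hnd hnn
    have hnil : b.items = [] := by
      by_contra hne
      exact pvTl_ne_zero _ hne hnn (Nat.le_zero.mp hfuel)
    simp [pvLoop, hnil, pvRR_nil]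
  | succ fuel ih =>
    intro b res hfuel hnd hnn
    by_cases hcond : (res.length : Int) < n ∧ b.items ≠ []
    · have htl : pvTl b.items ≠ 0 := pvTl_ne_zero _ hcond.2 hnn
      have hpass := pvPass_spec n b.items [] b res (by simp)
        hnd hnn
      have hkeys : b.keys = b.items.map (fun p => p.1) := rfl
      rw [pvRR_unfold _ htl]
      have hLlen : (pvHeads b.items).length = b.items.length := pvHeads_length _ hnn
      have hloop1 : pvLoop (fuel + 1) b res n
          = pvLoop fuel (pvPass b.keys b res n).1 (pvPass b.keys b res n).2 n := by
        rw [pvLoop]; simp [hcond]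
      by_cases hfull : (b.items.length : Int) ≤ n - (res.length : Int)
      · obtain ⟨hitems2, hnd2⟩ := hpass.2 hfull
        have hres2 : (pvPass b.keys b res n).2 = res ++ pvHeads b.items := by
          rw [hkeys, hpass.1, List.take_of_length_le]
          omega
        have hfuel2 : pvTl (pvStep b.items) ≤ fuel := by
          have := pvTl_step_lt b.items htl
          omega
        rw [hloop1, hkeys] at *
        rw [ih _ _ (by rw [hitems2]; exact hfuel2) hnd2
          (by rw [hitems2]; exact pvStep_ne_nil b.items)]
        have hrhs : (pvHeads b.items ++ pvRR (pvStep b.items)).take ((n - (res.length : Int)).toNat)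
            = pvHeads b.items ++ (pvRR (pvStep b.items)).take ((n - (res.length : Int)).toNat - (pvHeads b.items).length) := by
          rw [List.take_append, List.take_of_length_le (by rw [hLlen]; omega)]
        rw [hrhs, hres2, hitems2]
        simp only [List.nil_append]
        have harith : (n - (((res ++ pvHeads b.items).length) : Int)).toNat
            = (n - (res.length : Int)).toNat - (pvHeads b.items).length := by
          simp only [List.length_append]
          omega
        rw [harith, List.append_assoc]
      · -- the pass hits n in the middle: the loop stops right after
        have hres2 : (pvPass b.keys b res n).2 = res ++ (pvHeads b.items).take ((n - (res.length : Int)).toNat) := by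
          rw [hkeys, hpass.1]
        have hlen2 : n ≤ ((pvPass b.keys b res n).2.length : Int) := by
          rw [hres2]
          simp only [List.length_append, List.length_take, hLlen]
          push_cast
          omega
        rw [hloop1, pvLoop_of_ge _ _ _ _ hlen2, hres2]
        rw [List.take_append_of_le_length (by omega)]
    · rw [pvLoop, if_neg hcond]
      rcases not_and_or.mp hcond with h | h
      · have : (n - (res.length : Int)).toNat = 0 := by omega
        simp [this]
      · have : b.items = [] := not_not.mp h
        simp [this, pvRR_nil]
theorem pvFlatten_filter_cons {α : Type} (key : α → String) (x : α) (l : List α) :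
    ∀ ks : List String, ks.Nodup → key x ∈ ks →
      ((ks.map (fun k => (x :: l).filter (fun y => key y == k))).flatten).Perm
        (x :: (ks.map (fun k => l.filter (fun y => key y == k))).flatten) := by
  intro ks
  induction ks with
  | nil => intro _ h; simp at h
  | cons k ks ih =>
    intro hnd hmem
    by_cases hk : key x = k
    · have hknotin : k ∉ ks := (List.nodup_cons.mp hnd).1
      have hcong : ks.map (fun k' => (x :: l).filter (fun y => key y == k'))
          = ks.map (fun k' => l.filter (fun y => key y == k')) := by
        refine List.map_congr_left (fun k' hk' => ?_)
        rw [List.filter_cons, if_neg]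
        simp only [beq_iff_eq, hk]
        intro he; exact hknotin (he ▸ hk')
      have hhead : (x :: l).filter (fun y => key y == k) = x :: l.filter (fun y => key y == k) := by
        rw [List.filter_cons, if_pos (by simp [hk])]
      simp only [List.map_cons, List.flatten_cons, hhead, hcong, List.cons_append]
      exact List.Perm.cons x (List.Perm.refl _)
    · have hmem' : key x ∈ ks := by
        rcases List.mem_cons.mp hmem with h | h
        · exact absurd h hk
        · exact h
      have hhead : (x :: l).filter (fun y => key y == k) = l.filter (fun y => key y == k) := by
        rw [List.filter_cons, if_neg (by simpa using hk)]
      simp only [List.map_cons, List.flatten_cons, hhead]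
      refine List.Perm.trans (List.Perm.append_left _ (ih (List.nodup_cons.mp hnd).2 hmem')) ?_
      exact List.perm_middle
theorem pvPerm_filter_flatten {α : Type} (key : α → String) :
    ∀ (l : List α) (ks : List String), ks.Nodup → (∀ x ∈ l, key x ∈ ks) →
      l.Perm ((ks.map (fun k => l.filter (fun x => key x == k))).flatten) := by
  intro l
  induction l with
  | nil =>
    intro ks _ _
    have : (ks.map (fun k => ([] : List α).filter (fun x => key x == k))).flatten = [] := by
      simp
    rw [this]
  | cons x l ih =>
    intro ks hnd hcov
    refine List.Perm.trans (List.Perm.cons x (ih ks hnd (fun y hy => hcov y (by simp [hy])))) ?_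
    exact (pvFlatten_filter_cons key x l ks hnd (hcov x (by simp))).symm

theorem pvLang_mem_langs (items : List (List (String × Option String)))
    (r : List (String × Option String)) (hr : r ∈ items) : pvLang r ∈ pvLangs items :=
  (PySem.Set.mem_ofList _ _).mpr (List.mem_map_of_mem hr)

theorem pvItems_perm (items : List (List (String × Option String))) :
    items.Perm (((pvLangs items).map (fun k => pvBucket items k)).flatten) := by
  refine pvPerm_filter_flatten pvLang items (pvLangs items) (PySem.Set.nodup_ofList _)
    (fun r hr => pvLang_mem_langs items r hr)

theorem pvTl_pvG (items : List (List (String × Option String))) :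
    pvTl (pvG items) = items.length := by
  have hlen := (pvItems_perm items).length_eq
  rw [hlen, List.length_flatten]
  simp [pvTl, pvG, Function.comp_def, List.map_map]

theorem pvG_ne_nil (items : List (List (String × Option String))) :
    ∀ p ∈ pvG items, p.2 ≠ [] := by
  intro p hp
  simp only [pvG, List.mem_map] at hp
  obtain ⟨k, hk, rfl⟩ := hp
  obtain ⟨r, hr⟩ := List.mem_map.mp ((PySem.Set.mem_ofList _ _).mp hk)
  exact List.ne_nil_of_mem (List.mem_filter.mpr ⟨hr.1, by simp [hr.2]⟩)

theorem stratified_sample_eq_rr (items : List (List (String × Option String))) (n : Int)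
    (h : ¬ (items.length : Int) ≤ n) :
    stratified_sample items n = (pvRR (pvG items)).take n.toNat := by
  unfold stratified_sample
  rw [if_neg h]
  rw [pvLoop_spec n (items.length + 1) (pvBuckets items) []
    (by rw [pvBuckets_items, pvTl_pvG]; omega)
    (pvBuckets_keys_nodup items)
    (by rw [pvBuckets_items]; exact pvG_ne_nil items)]
  rw [pvBuckets_items]
  simp
-- ===== B-side: tagged round robin =====
theorem pvTl_map {α β : Type} (f : α → β) (gs : List (String × List α)) :
    pvTl (gs.map (fun p => (p.1, p.2.map f))) = pvTl gs := by
  simp [pvTl, List.map_map, Function.comp_def]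

theorem pvHeads_map {α β : Type} (f : α → β) (gs : List (String × List α)) :
    pvHeads (gs.map (fun p => (p.1, p.2.map f))) = (pvHeads gs).map f := by
  simp only [pvHeads, List.filterMap_map, List.map_filterMap]
  refine List.filterMap_congr (fun p _ => ?_)
  simp [List.head?_map]

theorem pvStep_map {α β : Type} (f : α → β) (gs : List (String × List α)) :
    pvStep (gs.map (fun p => (p.1, p.2.map f))) = (pvStep gs).map (fun p => (p.1, p.2.map f)) := by
  simp only [pvStep, List.map_map, Function.comp_def, ← List.map_tail, List.filter_map,
    List.isEmpty_map]

theorem pvRR_map {α β : Type} (f : α → β) (gs : List (String × List α)) :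
    pvRR (gs.map (fun p => (p.1, p.2.map f))) = (pvRR gs).map f := by
  by_cases h : pvTl gs = 0
  · have h1 : pvRR (gs.map (fun p => (p.1, p.2.map f))) = [] := by
      rw [pvRR]; simp [pvTl_map, h]
    have h2 : pvRR gs = [] := by rw [pvRR]; simp [h]
    simp [h1, h2]
  · rw [pvRR_unfold _ (by rw [pvTl_map]; exact h), pvRR_unfold _ h]
    rw [pvHeads_map, pvStep_map, pvRR_map f (pvStep gs), List.map_append]
termination_by pvTl gs
decreasing_by exact pvTl_step_lt gs h

def pvRank (items : List (List (String × Option String))) (k : String) : Int :=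
  ((pvLangs items).idxOf k : Int)

def pvTagB (items : List (List (String × Option String))) (k : String) :
    List ((Int × Int) × List (String × Option String)) :=
  (pvBucket items k).zipIdx.map (fun e => (((e.2 : Int), pvRank items k), e.1))

def pvGK (items : List (List (String × Option String))) :
    List (String × List ((Int × Int) × List (String × Option String))) :=
  (pvLangs items).map (fun k => (k, pvTagB items k))

theorem pvG_eq_map_pvGK (items : List (List (String × Option String))) :
    pvG items = (pvGK items).map (fun p => (p.1, p.2.map (fun e => e.2))) := by
  simp only [pvG, pvGK, List.map_map, Function.comp_def, pvTagB, List.map_map]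
  refine List.map_congr_left (fun k _ => ?_)
  simp [Function.comp_def]

-- Set.ofList append helpers
theorem pvOfList_append_singleton {α : Type} [BEq α] (xs : List α) (y : α) :
    PySem.Set.ofList (xs ++ [y]) = PySem.Set.add (PySem.Set.ofList xs) y := by
  rw [PySem.Set.ofList_eq_foldl, PySem.Set.ofList_eq_foldl, List.foldl_append]
  rfl

theorem pvIdxOf_ofList_append (xs : List String) (y k : String) (hk : k ∈ PySem.Set.ofList xs) :
    (PySem.Set.ofList (xs ++ [y])).idxOf k = (PySem.Set.ofList xs).idxOf k := by
  rw [pvOfList_append_singleton, PySem.Set.add_eq_ite]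
  split
  · rfl
  · exact List.idxOf_append_of_mem hk

theorem pvIdxOf_ofList_append_self (xs : List String) (y : String)
    (hy : y ∉ PySem.Set.ofList xs) :
    (PySem.Set.ofList (xs ++ [y])).idxOf y = (PySem.Set.ofList xs).length := by
  rw [pvOfList_append_singleton, PySem.Set.add_of_not_mem hy]
  rw [List.idxOf_append_of_notMem hy]
  simp

theorem pvLen_ofList_append {α : Type} [BEq α] [LawfulBEq α] (xs : List α) (y : α) :
    (PySem.Set.ofList (xs ++ [y])).length
      = if y ∈ PySem.Set.ofList xs then (PySem.Set.ofList xs).length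
        else (PySem.Set.ofList xs).length + 1 := by
  rw [pvOfList_append_singleton, PySem.Set.add_eq_ite]
  split <;> simp
theorem pvFoldl_inv {σ β : Type} (f : σ → β → σ) (I : List β → σ → Prop)
    (l : List β) (init : σ) (h0 : I [] init)
    (hstep : ∀ pre x s, I pre s → I (pre ++ [x]) (f s x)) : I l (l.foldl f init) := by
  suffices h : ∀ (suf pre : List β) (s : σ), I pre s → I (pre ++ suf) (suf.foldl f s) by
    simpa using h l [] init h0
  intro suf
  induction suf with
  | nil => intro pre s h; simpa using h
  | cons x suf ih =>
    intro pre s hI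
    have := ih (pre ++ [x]) (f s x) (hstep pre x s hI)
    simpa using this

def pvInv (pre : List (List (String × Option String)))
    (st : PySem.Dict String Int × PySem.Dict String Int ×
      List ((Int × Int) × List (String × Option String))) : Prop :=
  (∀ k, st.1.getD k 0 = (((pre.map pvLang).count k : Nat) : Int))
  ∧ (∀ k, st.2.1.contains k = decide (k ∈ pre.map pvLang))
  ∧ (∀ k, k ∈ pre.map pvLang →
      st.2.1.getD k 0 = (((PySem.Set.ofList (pre.map pvLang)).idxOf k : Nat) : Int))
  ∧ ((st.2.1.size : Int) = (((PySem.Set.ofList (pre.map pvLang)).length : Nat) : Int))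
  ∧ (st.2.2.map (fun e => e.2) = pre)
  ∧ (∀ k, st.2.2.filter (fun e => pvLang e.2 == k) = pvTagB pre k)

theorem pvBucket_append (pre : List (List (String × Option String)))
    (r : List (String × Option String)) (k : String) :
    pvBucket (pre ++ [r]) k = pvBucket pre k ++ (if pvLang r == k then [r] else []) := by
  simp [pvBucket, List.filter_append, List.filter_cons]

theorem pvBucket_nil_of_not_mem (pre : List (List (String × Option String))) (k : String)
    (h : k ∉ pre.map pvLang) : pvBucket pre k = [] := by
  unfold pvBucket
  rw [List.filter_eq_nil_iff]
  intro r hr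
  simp only [beq_iff_eq]
  intro he
  exact h (he ▸ List.mem_map_of_mem hr)

theorem pvMem_of_bucket_ne_nil (pre : List (List (String × Option String))) (k : String)
    (h : pvBucket pre k ≠ []) : k ∈ pre.map pvLang := by
  by_contra hk
  exact h (pvBucket_nil_of_not_mem pre k hk)

theorem pvTagB_stable (pre : List (List (String × Option String)))
    (r : List (String × Option String)) (k : String) (hk : pvLang r ≠ k) :
    pvTagB (pre ++ [r]) k = pvTagB pre k := by
  unfold pvTagB
  rw [pvBucket_append, if_neg (by simpa using hk), List.append_nil]
  by_cases hbk : pvBucket pre k = []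
  · simp [hbk]
  · have hkmem : k ∈ pre.map pvLang := pvMem_of_bucket_ne_nil pre k hbk
    have : pvRank (pre ++ [r]) k = pvRank pre k := by
      unfold pvRank pvLangs
      rw [List.map_append, List.map_cons, List.map_nil]
      exact_mod_cast pvIdxOf_ofList_append (pre.map pvLang) (pvLang r) k
        ((PySem.Set.mem_ofList _ _).mpr hkmem)
    rw [this]

theorem pvCount_eq_bucket_length (pre : List (List (String × Option String))) (k : String) :
    (pre.map pvLang).count k = (pvBucket pre k).length := by
  rw [List.count_eq_countP, List.countP_map]
  unfold pvBucket
  rw [List.countP_eq_length_filter]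
  rfl

theorem pvTagFold_inv (items : List (List (String × Option String))) :
    pvInv items (pvTagFold items) := by
  unfold pvTagFold
  refine pvFoldl_inv _ pvInv items _ ?_ ?_
  · refine ⟨fun k => by simp [PySem.Dict.getD_empty], fun k => by simp [PySem.Dict.contains_empty],
      fun k hk => by simp at hk, by simp [PySem.Dict.size_empty, PySem.Set.ofList],
      rfl, fun k => by simp [pvTagB, pvBucket]⟩
  · rintro pre r ⟨w, rk, kd⟩ ⟨IW, IRc, IRv, IRs, IKs, IKf⟩
    simp only []
    have hLnew : (pre ++ [r]).map pvLang = pre.map pvLang ++ [pvLang r] := by simp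
    by_cases hc : rk.contains (pvLang r) = true
    · -- (pvLang r) already seen
      have hmem : (pvLang r) ∈ (pre.map pvLang) := by have := IRc (pvLang r); rw [hc] at this; simpa using this.symm
      have hsetmem : (pvLang r) ∈ PySem.Set.ofList (pre.map pvLang) := (PySem.Set.mem_ofList _ _).mpr hmem
      refine ⟨?_, ?_, ?_, ?_, ?_, ?_⟩
      · intro k
        rw [if_pos hc]
        rw [PySem.Dict.getD_insert]
        rw [hLnew, List.count_append]
        by_cases hk : k = (pvLang r)
        · subst hk; rw [if_pos rfl, IW (pvLang r)]; simp
        · rw [if_neg hk, IW k]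
          have : List.count k [(pvLang r)] = 0 := by
            simp [List.count_singleton]; exact fun h => hk h.symm
          rw [this]; simp
      · intro k
        rw [if_pos hc]
        rw [IRc k, hLnew]
        by_cases hk : k = (pvLang r)
        · subst hk; simp [hmem]
        · simp [List.mem_append, hk]
      · intro k hk
        rw [if_pos hc]
        rw [hLnew] at hk ⊢
        have hkL : k ∈ (pre.map pvLang) := by
          rcases List.mem_append.mp hk with h | h
          · exact h
          · simp at h; exact h ▸ hmem
        rw [IRv k hkL, pvIdxOf_ofList_append _ _ _ ((PySem.Set.mem_ofList _ _).mpr hkL)]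
      · rw [if_pos hc]
        rw [IRs, hLnew, pvLen_ofList_append, if_pos hsetmem]
      · simp only [hc, if_true, List.map_append, IKs]; simp
      · intro k
        simp only [hc, if_true, List.filter_append, IKf k]
        by_cases hk : (pvLang r) = k
        · subst hk
          rw [List.filter_cons, if_pos (by simp), List.filter_nil]
          unfold pvTagB
          rw [pvBucket_append, if_pos (by simp)]
          rw [List.zipIdx_append]
          rw [List.map_append]
          congr 1
          · -- old part: rank stable
            have : pvRank (pre ++ [r]) (pvLang r) = pvRank pre (pvLang r) := by
              unfold pvRank pvLangs
              rw [hLnew]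
              exact_mod_cast pvIdxOf_ofList_append (pre.map pvLang) (pvLang r) (pvLang r) hsetmem
            rw [this]
          · -- new element
            simp only [List.zipIdx, List.map_cons, List.map_nil]
            have h1 : w.getD (pvLang r) 0 = ((pvBucket pre (pvLang r)).length : Int) := by
              rw [IW (pvLang r), pvCount_eq_bucket_length]
            have h2 : rk.getD (pvLang r) 0 = pvRank (pre ++ [r]) (pvLang r) := by
              rw [IRv (pvLang r) hmem]
              unfold pvRank pvLangs
              rw [hLnew]
              exact_mod_cast (pvIdxOf_ofList_append (pre.map pvLang) (pvLang r) (pvLang r) hsetmem).symm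
            rw [h1, h2]
            norm_num
        · rw [List.filter_cons, if_neg (by simp only [beq_iff_eq]; exact fun h => hk h), List.filter_nil, List.append_nil]
          exact (pvTagB_stable pre r k hk).symm
    · -- fresh language
      have hmem : (pvLang r) ∉ (pre.map pvLang) := by
        have := IRc (pvLang r)
        rw [Bool.not_eq_true] at hc
        rw [hc] at this
        simpa using this.symm
      have hsetmem : (pvLang r) ∉ PySem.Set.ofList (pre.map pvLang) := fun h => hmem ((PySem.Set.mem_ofList _ _).mp h)
      refine ⟨?_, ?_, ?_, ?_, ?_, ?_⟩
      · intro k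
        rw [if_neg hc]
        rw [PySem.Dict.getD_insert]
        rw [hLnew, List.count_append]
        by_cases hk : k = (pvLang r)
        · subst hk; rw [if_pos rfl, IW (pvLang r)]; simp
        · rw [if_neg hk, IW k]
          have hc0 : List.count k [pvLang r] = 0 := by
            simp [List.count_singleton]; exact fun h => hk h.symm
          rw [hc0]; simp
      · intro k
        rw [if_neg hc]
        rw [PySem.Dict.contains_insert, IRc k, hLnew]
        by_cases hk : k = (pvLang r)
        · subst hk; simp
        · simp [List.mem_append, hk]
      · intro k hk
        rw [if_neg hc]
        rw [hLnew] at hk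
        rw [PySem.Dict.getD_insert]
        by_cases hkl : k = (pvLang r)
        · subst hkl
          rw [if_pos rfl, IRs, hLnew]
          rw [pvIdxOf_ofList_append_self (pre.map pvLang) (pvLang r) hsetmem]
        · rw [if_neg hkl]
          have hkL : k ∈ (pre.map pvLang) := by
            rcases List.mem_append.mp hk with h | h
            · exact h
            · simp at h; exact absurd h hkl
          rw [IRv k hkL, hLnew, pvIdxOf_ofList_append _ _ _ ((PySem.Set.mem_ofList _ _).mpr hkL)]
      · rw [if_neg hc]
        rw [PySem.Dict.size_insert, if_neg (by simp [hc])]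
        rw [hLnew, pvLen_ofList_append, if_neg hsetmem]
        push_cast [IRs]
        ring
      · simp only [hc, if_false, List.map_append, IKs]; simp
      · intro k
        rw [if_neg hc]
        simp only [List.filter_append, IKf k]
        by_cases hk : (pvLang r) = k
        · subst hk
          rw [List.filter_cons, if_pos (by simp), List.filter_nil]
          have hbk : pvBucket pre (pvLang r) = [] := pvBucket_nil_of_not_mem pre (pvLang r) hmem
          have hold : pvTagB pre (pvLang r) = [] := by simp [pvTagB, hbk]
          unfold pvTagB
          rw [pvBucket_append, if_pos (by simp), hbk]
          simp only [List.nil_append, hold]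
          simp only [List.zipIdx, List.map_cons, List.map_nil, List.nil_append]
          have h1 : w.getD (pvLang r) 0 = 0 := by
            rw [IW (pvLang r)]
            rw [List.count_eq_zero_of_not_mem hmem]
            rfl
          have h2 : (rk.insert (pvLang r) (rk.size : Int)).getD (pvLang r) 0 = pvRank (pre ++ [r]) (pvLang r) := by
            rw [PySem.Dict.getD_insert, if_pos rfl, IRs]
            unfold pvRank pvLangs
            rw [hLnew]
            rw [pvIdxOf_ofList_append_self (pre.map pvLang) (pvLang r) hsetmem]
          rw [← h2]
          simp [h1]
        · rw [List.filter_cons, if_neg (by simp only [beq_iff_eq]; exact fun h => hk h), List.filter_nil, List.append_nil]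
          exact (pvTagB_stable pre r k hk).symm
-- ===== ordering of the tagged round robin =====
def pvOK (M t : Int) (gs : List (String × List ((Int × Int) × List (String × Option String)))) : Prop :=
  (∀ p ∈ gs, p.2 ≠ [] ∧ ∃ q : Int, 0 ≤ q ∧ q < M ∧
      ∀ (j : Nat) (hj : j < p.2.length), (p.2[j]).1 = (t + (j : Int), q))
  ∧ gs.Pairwise (fun p p' => ∀ e ∈ p.2, ∀ e' ∈ p'.2, e.1.2 < e'.1.2)

theorem pvOK_step (M t : Int) (gs : List (String × List ((Int × Int) × List (String × Option String))))
    (h : pvOK M t gs) : pvOK M (t + 1) (pvStep gs) := by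
  obtain ⟨h1, h2⟩ := h
  constructor
  · intro p hp
    simp only [pvStep, List.mem_filter, List.mem_map] at hp
    obtain ⟨⟨p0, hp0, rfl⟩, hne⟩ := hp
    obtain ⟨-, q, hq0, hqM, htag⟩ := h1 p0 hp0
    refine ⟨by simpa [List.isEmpty_iff] using hne, q, hq0, hqM, ?_⟩
    intro j hj
    simp only [List.length_tail] at hj
    have : (p0.2.tail)[j] = p0.2[j + 1]'(by omega) := by
      rw [List.getElem_tail]
    rw [this, htag (j + 1) (by omega)]
    push_cast
    ring_nf
  · have : pvStep gs = (gs.map (fun p => (p.1, p.2.tail))).filter (fun p => !p.2.isEmpty) := rfl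
    rw [this]
    refine List.Pairwise.filter _ ?_
    rw [List.pairwise_map]
    refine h2.imp ?_
    intro p p' hpp' e he e' he'
    exact hpp' e (List.mem_of_mem_tail he) e' (List.mem_of_mem_tail he')

theorem pvRR_mem_bounds (M : Int) :
    ∀ (gs : List (String × List ((Int × Int) × List (String × Option String)))) (t : Int),
      pvOK M t gs → ∀ e ∈ pvRR gs, t ≤ e.1.1 ∧ 0 ≤ e.1.2 ∧ e.1.2 < M := by
  intro gs
  by_cases h : pvTl gs = 0
  · intro t _ e he
    rw [pvRR] at he
    simp [h] at he
  · intro t hok e he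
    rw [pvRR_unfold _ h] at he
    rcases List.mem_append.mp he with he | he
    · obtain ⟨p, hp, hhead⟩ := List.mem_filterMap.mp he
      obtain ⟨hne, q, hq0, hqM, htag⟩ := hok.1 p hp
      obtain ⟨x, xs, hv⟩ := List.exists_cons_of_ne_nil hne
      have hhead' : p.2.head? = some x := by simp [hv]
      rw [hhead'] at hhead
      obtain rfl := Option.some_inj.mp hhead
      have hx : x.1 = (t + (0 : Int), q) := by
        have h := htag 0 (by simp [hv])
        simpa [hv] using h
      rw [hx]
      simp
      omega
    · have := pvRR_mem_bounds M (pvStep gs) (t + 1) (pvOK_step M t gs hok) e he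
      exact ⟨by omega, this.2⟩
termination_by gs => pvTl gs
decreasing_by exact pvTl_step_lt gs h

theorem pvHeads_eq_map_headI {α : Type} [Inhabited α] (gs : List (String × List α))
    (h : ∀ p ∈ gs, p.2 ≠ []) : pvHeads gs = gs.map (fun p => p.2.headI) := by
  induction gs with
  | nil => rfl
  | cons p gs ih =>
    have hp := h p (by simp)
    cases hv : p.2 with
    | nil => exact absurd hv hp
    | cons x xs =>
      simp only [pvHeads, List.filterMap_cons, hv, List.map_cons]
      rw [← pvHeads]
      rw [ih (fun q hq => h q (by simp [hq]))]
      simp [hv]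

theorem pvRR_pairwise (M : Int) :
    ∀ (gs : List (String × List ((Int × Int) × List (String × Option String)))) (t : Int),
      pvOK M t gs →
      (pvRR gs).Pairwise (fun a b => a.1.1 * M + a.1.2 < b.1.1 * M + b.1.2) := by
  intro gs
  by_cases h : pvTl gs = 0
  · intro t _
    rw [pvRR]
    simp [h]
  · intro t hok
    rw [pvRR_unfold _ h]
    rw [List.pairwise_append]
    have hne : ∀ p ∈ gs, p.2 ≠ [] := fun p hp => (hok.1 p hp).1
    refine ⟨?_, pvRR_pairwise M (pvStep gs) (t + 1) (pvOK_step M t gs hok), ?_⟩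
    · -- heads are strictly increasing in the rank coordinate, equal in the first
      rw [pvHeads_eq_map_headI gs hne, List.pairwise_map]
      refine hok.2.imp_of_mem ?_
      intro p p' hp hp' hrel
      obtain ⟨hne1, q, hq0, hqM, htag⟩ := hok.1 p hp
      obtain ⟨hne2, q', hq0', hqM', htag'⟩ := hok.1 p' hp'
      have hm1 : p.2.headI ∈ p.2 := by cases hv : p.2 with
        | nil => exact absurd hv hne1
        | cons x xs => simp [hv]
      have hm2 : p'.2.headI ∈ p'.2 := by cases hv : p'.2 with
        | nil => exact absurd hv hne2
        | cons x xs => simp [hv]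
      have hlt : p.2.headI.1.2 < p'.2.headI.1.2 := hrel _ hm1 _ hm2
      have ht1 : p.2.headI.1 = (t, q) := by
        obtain ⟨x, xs, hv⟩ := List.exists_cons_of_ne_nil hne1
        have h := htag 0 (by simp [hv])
        simp only [hv] at h ⊢
        simpa using h
      have ht2 : p'.2.headI.1 = (t, q') := by
        obtain ⟨x, xs, hv⟩ := List.exists_cons_of_ne_nil hne2
        have h := htag' 0 (by simp [hv])
        simp only [hv] at h ⊢
        simpa using h
      rw [ht1, ht2]
      rw [ht1, ht2] at hlt
      simp at hlt ⊢
      omega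
    · -- every head precedes everything produced by later rounds
      intro a ha b hb
      obtain ⟨p, hp, hhead⟩ := List.mem_filterMap.mp ha
      obtain ⟨hne1, q, hq0, hqM, htag⟩ := hok.1 p hp
      obtain ⟨x, xs, hv⟩ := List.exists_cons_of_ne_nil hne1
      have hhead' : p.2.head? = some x := by simp [hv]
      rw [hhead'] at hhead
      obtain rfl := Option.some_inj.mp hhead
      have hta : x.1 = (t, q) := by
        have h := htag 0 (by simp [hv])
        simpa [hv] using h
      obtain ⟨htb, hqb0, hqbM⟩ :=
        pvRR_mem_bounds M (pvStep gs) (t + 1) (pvOK_step M t gs hok) b hb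
      rw [hta]
      have hM : 0 < M := lt_of_le_of_lt hq0 hqM
      calc t * M + q < (t + 1) * M := by nlinarith
        _ ≤ b.1.1 * M := by
            have := mul_le_mul_of_nonneg_right htb (le_of_lt hM)
            linarith
        _ ≤ b.1.1 * M + b.1.2 := by linarith
termination_by gs => pvTl gs
decreasing_by exact pvTl_step_lt gs h
-- ===== perm: round robin is a permutation of the grouped items =====
theorem pvHeads_append_step_perm {α : Type} :
    ∀ gs : List (String × List α),
      (pvHeads gs ++ ((pvStep gs).map (fun p => p.2)).flatten).Perm
        ((gs.map (fun p => p.2)).flatten) := by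
  intro gs
  induction gs with
  | nil => simp [pvHeads, pvStep]
  | cons p gs ih =>
    cases hv : p.2 with
    | nil =>
      simp only [pvHeads, List.filterMap_cons, hv, List.map_cons, List.flatten_cons]
      have hstep : pvStep (p :: gs) = pvStep gs := by
        simp [pvStep, hv]
      rw [hstep]
      simpa [pvHeads] using ih
    | cons x xs =>
      have hheads : pvHeads (p :: gs) = x :: pvHeads gs := by
        simp [pvHeads, hv]
      have hstep : ((pvStep (p :: gs)).map (fun p => p.2)).flatten
          = xs ++ ((pvStep gs).map (fun p => p.2)).flatten := by
        simp only [pvStep, List.map_cons, hv, List.tail_cons, List.filter_cons]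
        by_cases hxs : xs = []
        · simp [hxs]
        · rw [if_pos (by simpa [List.isEmpty_iff] using hxs)]
          simp
      rw [hheads, hstep, List.map_cons, List.flatten_cons, hv]
      refine List.Perm.cons x ?_
      refine List.Perm.trans ?_ (List.Perm.append_left xs ih)
      exact List.perm_append_comm_assoc (pvHeads gs) xs _

theorem pvRR_perm {α : Type} :
    ∀ gs : List (String × List α), (pvRR gs).Perm ((gs.map (fun p => p.2)).flatten) := by
  intro gs
  by_cases h : pvTl gs = 0
  · have hnil : ∀ l ∈ gs.map (fun p => p.2), l = [] := by
      intro l hl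
      obtain ⟨p, hp, rfl⟩ := List.mem_map.mp hl
      have hle := List.le_sum_of_mem (List.mem_map_of_mem (f := fun p => p.2.length) hp)
      unfold pvTl at h
      have : p.2.length = 0 := Nat.le_zero.mp (le_trans hle (le_of_eq h))
      simpa [List.length_eq_zero_iff] using this
    rw [pvRR, dif_pos h, List.flatten_eq_nil_iff.mpr hnil]
  · rw [pvRR_unfold _ h]
    refine List.Perm.trans (List.Perm.append_left _ (pvRR_perm (pvStep gs))) ?_
    exact pvHeads_append_step_perm gs
termination_by gs => pvTl gs
decreasing_by exact pvTl_step_lt gs h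

-- ===== the tagged groups satisfy the ordering invariant =====
theorem pvGK_ne_nil (items : List (List (String × Option String))) :
    ∀ p ∈ pvGK items, p.2 ≠ [] := by
  intro p hp
  simp only [pvGK, List.mem_map] at hp
  obtain ⟨k, hk, rfl⟩ := hp
  obtain ⟨r, hr⟩ := List.mem_map.mp ((PySem.Set.mem_ofList _ _).mp hk)
  have : r ∈ pvBucket items k := List.mem_filter.mpr ⟨hr.1, by simp [hr.2]⟩
  simp only [pvTagB, ne_eq, List.map_eq_nil_iff, List.zipIdx_eq_nil_iff]
  exact List.ne_nil_of_mem this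

theorem pvGK_ok (items : List (List (String × Option String))) :
    pvOK ((pvLangs items).length : Int) 0 (pvGK items) := by
  constructor
  · intro p hp
    have hne := pvGK_ne_nil items p hp
    simp only [pvGK, List.mem_map] at hp
    obtain ⟨k, hk, rfl⟩ := hp
    refine ⟨hne, pvRank items k, by simp [pvRank], ?_, ?_⟩
    · simp only [pvRank]
      exact_mod_cast List.idxOf_lt_length_of_mem hk
    · intro j hj
      simp only [pvTagB] at hj ⊢
      simp only [List.length_map, List.length_zipIdx] at hj
      simp [List.getElem_zipIdx]
  · simp only [pvGK]
    rw [List.pairwise_map]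
    have hnd : (pvLangs items).Nodup := PySem.Set.nodup_ofList _
    have : (pvLangs items).Pairwise (fun k k' => pvRank items k < pvRank items k') := by
      rw [List.pairwise_iff_getElem]
      intro i j hi hj hij
      unfold pvRank
      rw [hnd.idxOf_getElem i hi, hnd.idxOf_getElem j hj]
      exact_mod_cast hij
    refine this.imp ?_
    intro k k' hkk' e he e' he'
    simp only [pvTagB, List.mem_map] at he he'
    obtain ⟨a, _, rfl⟩ := he
    obtain ⟨a', _, rfl⟩ := he'
    exact hkk'

-- ===== keyed list: membership bounds and permutation =====
theorem pvKeyed_filter (items : List (List (String × Option String))) (k : String) :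
    ((pvTagFold items).2.2).filter (fun e => pvLang e.2 == k) = pvTagB items k :=
  (pvTagFold_inv items).2.2.2.2.2 k

theorem pvKeyed_map_snd (items : List (List (String × Option String))) :
    ((pvTagFold items).2.2).map (fun e => e.2) = items :=
  (pvTagFold_inv items).2.2.2.2.1

theorem pvKeyed_mem_bounds (items : List (List (String × Option String))) :
    ∀ e ∈ (pvTagFold items).2.2,
      0 ≤ e.1.1 ∧ 0 ≤ e.1.2 ∧ e.1.2 < ((pvLangs items).length : Int) := by
  intro e he
  have hmem : e ∈ ((pvTagFold items).2.2).filter (fun e' => pvLang e'.2 == pvLang e.2) :=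
    List.mem_filter.mpr ⟨he, by simp⟩
  rw [pvKeyed_filter] at hmem
  simp only [pvTagB, List.mem_map] at hmem
  obtain ⟨a, ha, he2⟩ := hmem
  have hbmem : a.1 ∈ pvBucket items (pvLang e.2) := List.fst_mem_of_mem_zipIdx ha
  have hk : pvLang e.2 ∈ pvLangs items :=
    (PySem.Set.mem_ofList _ _).mpr
      (pvMem_of_bucket_ne_nil items (pvLang e.2) (List.ne_nil_of_mem hbmem))
  rw [← he2]
  refine ⟨by simp, by simp [pvRank], ?_⟩
  simp only [pvRank]
  exact_mod_cast List.idxOf_lt_length_of_mem hk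
-- ===== sorting with a tuple key = sorting with a scalar key, on bounded tags =====
theorem pvInsertBy_congr {α : Type} (f g : α → α → Bool) (x : α) :
    ∀ acc : List α, (∀ y ∈ acc, f x y = g x y) →
      PySem.List.insertBy f x acc = PySem.List.insertBy g x acc := by
  intro acc
  induction acc with
  | nil => intro _; rfl
  | cons y ys ih =>
    intro h
    simp only [PySem.List.insertBy]
    rw [h y (by simp)]
    by_cases hg : g x y = true
    · simp [hg]
    · simp only [Bool.not_eq_true] at hg
      simp only [hg, Bool.false_eq_true, if_false]
      have := ih (fun z hz => h z (by simp [hz]))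
      simp only [PySem.List.insertBy] at this
      rw [this]

theorem pvFoldl_insertBy_congr {α : Type} (f g : α → α → Bool) :
    ∀ (xs acc : List α),
      (∀ a b, (a ∈ xs ∨ a ∈ acc) → (b ∈ xs ∨ b ∈ acc) → f a b = g a b) →
      xs.foldl (fun acc x => PySem.List.insertBy f x acc) acc
        = xs.foldl (fun acc x => PySem.List.insertBy g x acc) acc := by
  intro xs
  induction xs with
  | nil => intro _ _; rfl
  | cons x xs ih =>
    intro acc h
    simp only [List.foldl_cons]
    rw [pvInsertBy_congr f g x acc (fun y hy => h x y (by simp) (Or.inr hy))]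
    refine ih _ ?_
    intro a b ha hb
    refine h a b ?_ ?_
    · rcases ha with ha | ha
      · exact Or.inl (by simp [ha])
      · rcases (PySem.List.mem_insertBy _ _ _ _).mp ha with rfl | ha
        · exact Or.inl (by simp)
        · exact Or.inr ha
    · rcases hb with hb | hb
      · exact Or.inl (by simp [hb])
      · rcases (PySem.List.mem_insertBy _ _ _ _).mp hb with rfl | hb
        · exact Or.inl (by simp)
        · exact Or.inr hb

theorem pvLex_scalar (M i q i' q' : Int) (hq : 0 ≤ q) (hqM : q < M) (hq' : 0 ≤ q') (hqM' : q' < M) :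
    (decide (i < i') || (!decide (i' < i) && decide (q < q')))
      = decide (i * M + q < i' * M + q') := by
  have hM : 0 < M := lt_of_le_of_lt hq hqM
  by_cases h1 : i < i'
  · simp only [h1, decide_true, Bool.true_or]
    symm
    simp only [decide_eq_true_eq]
    nlinarith
  · by_cases h2 : i' < i
    · simp only [h1, h2, decide_true, decide_false, Bool.false_or, Bool.not_true,
        Bool.false_and]
      symm
      simp only [decide_eq_false_iff_not, not_lt]
      nlinarith
    · have heq : i = i' := le_antisymm (not_lt.mp h2) (not_lt.mp h1)
      subst heq
      simp only [h1, h2, decide_false, Bool.false_or, Bool.not_false, Bool.true_and]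
      simp only [decide_eq_decide]
      omega

theorem pvSorted2_eq_rrGK (items : List (List (String × Option String))) :
    PySem.List.sorted2 (pvTagFold items).2.2 (fun p => p.1.1) (fun p => p.1.2)
      = pvRR (pvGK items) := by
  have hM : ∀ e ∈ (pvTagFold items).2.2,
      0 ≤ e.1.1 ∧ 0 ≤ e.1.2 ∧ e.1.2 < ((pvLangs items).length : Int) :=
    pvKeyed_mem_bounds items
  have hscalar : PySem.List.sorted2 (pvTagFold items).2.2 (fun p => p.1.1) (fun p => p.1.2)
      = PySem.List.sorted (pvTagFold items).2.2
          (fun e => e.1.1 * ((pvLangs items).length : Int) + e.1.2) := by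
    rw [PySem.List.sorted_eq_foldl_insertBy]
    show (pvTagFold items).2.2.foldl
        (fun acc x => PySem.List.insertBy
          (fun a b => decide (a.1.1 < b.1.1) || (!decide (b.1.1 < a.1.1) && decide (a.1.2 < b.1.2)))
          x acc) []
      = _
    refine pvFoldl_insertBy_congr _ _ _ [] ?_
    intro a b ha hb
    have hba := hM a (by simpa using ha)
    have hbb := hM b (by simpa using hb)
    exact pvLex_scalar _ _ _ _ _ hba.2.1 hba.2.2 hbb.2.1 hbb.2.2
  rw [hscalar]
  refine PySem.List.sorted_eq_of_perm_of_pairwise_lt _ _ _ ?_ ?_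
  · -- pvRR (pvGK items) is a permutation of the keyed list
    refine List.Perm.trans (pvRR_perm (pvGK items)) ?_
    have : (pvGK items).map (fun p => p.2) = (pvLangs items).map (fun k => pvTagB items k) := by
      simp [pvGK, List.map_map, Function.comp_def]
    rw [this]
    have hflt : (pvLangs items).map (fun k => pvTagB items k)
        = (pvLangs items).map (fun k => ((pvTagFold items).2.2).filter (fun e => pvLang e.2 == k)) := by
      exact List.map_congr_left (fun k _ => (pvKeyed_filter items k).symm)
    rw [hflt]
    refine (pvPerm_filter_flatten (fun e => pvLang e.2) ((pvTagFold items).2.2) (pvLangs items)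
      (PySem.Set.nodup_ofList _) ?_).symm
    intro e he
    have : e.2 ∈ items := by
      rw [← pvKeyed_map_snd items]
      exact List.mem_map_of_mem he
    exact pvLang_mem_langs items e.2 this
  · exact pvRR_pairwise _ (pvGK items) 0 (pvGK_ok items)

theorem stratified_sample_alt_eq_rr (items : List (List (String × Option String))) (n : Int)
    (h : ¬ (items.length : Int) ≤ n) :
    stratified_sample_alt items n = (pvRR (pvG items)).take n.toNat := by
  unfold stratified_sample_alt
  rw [if_neg h]
  simp only []
  rw [pvSorted2_eq_rrGK items]
  rw [PySem.List.slice_to _ (le_max_left 0 n)]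
  rw [pvG_eq_map_pvGK items, pvRR_map]
  rw [← List.map_take]
  have : (max 0 n).toNat = n.toNat := by omega
  rw [this]

-- ===== VERDICT (by name: the statement is the Claim_ definition above) =====
theorem stratified_sample_spec : Claim_equal_stratified_sample := by
  intro items n _ _
  unfold Spec_stratified_sample
  by_cases hle : (items.length : Int) ≤ n
  · unfold stratified_sample stratified_sample_alt
    rw [if_pos hle, if_pos hle]
  · rw [stratified_sample_eq_rr items n hle, stratified_sample_alt_eq_rr items n hle]
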